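-- pv_equiv track=rewrite | github.com/aggressiveidea/primality_test | main.py | _is_mersenne_exponent
-- ===== SOURCE A (Python) =====
-- from typing import Dict, List, Tuple, Any, Optional
--
-- def _is_mersenne_exponent(n: int) -> Optional[int]:
--     """Check if n is of the form 2^p - 1, return p if true."""
--     n_plus_1 = n + 1
--     if n_plus_1 <= 0:
--         return None
--
--     # Check if n+1 is a power of 2
--     if (n_plus_1 & (n_plus_1 - 1)) != 0:
--         return None
--
--     # Find the exponent
--     p = 0
--     temp = n_plus_1
--     while temp > 1:
--         temp >>= 1
--         p += 1
--
--     return p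
-- ===== SOURCE B (Python) =====
-- from typing import Optional
--
-- def _is_mersenne_exponent(n: int) -> Optional[int]:
--     """Check if n is of the form 2^p - 1, return p if true."""
--     m = n + 1
--     if m <= 0:
--         return None
--     p = m.bit_length() - 1
--     return p if m == 2 ** p else None
-- ===== Notes on version B (the rewrite author's own statement) =====
-- stated objective: simpler
-- what changed: B derives the exponent in closed form from bit_length and verifies n+1 == 2**p in one comparison, removing both the iterative shift loop and the separate (m & (m-1)) power-of-two test.
import Mathlib
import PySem

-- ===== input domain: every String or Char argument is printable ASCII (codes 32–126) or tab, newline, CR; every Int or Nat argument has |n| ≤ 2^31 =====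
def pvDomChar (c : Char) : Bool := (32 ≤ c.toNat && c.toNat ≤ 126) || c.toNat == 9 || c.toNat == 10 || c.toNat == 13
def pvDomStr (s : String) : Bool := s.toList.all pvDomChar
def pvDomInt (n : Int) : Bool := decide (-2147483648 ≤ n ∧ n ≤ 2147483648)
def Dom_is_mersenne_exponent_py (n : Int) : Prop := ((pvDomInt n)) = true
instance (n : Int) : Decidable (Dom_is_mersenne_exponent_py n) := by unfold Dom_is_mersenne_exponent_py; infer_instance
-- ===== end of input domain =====

-- B replaces A's shift loop and separate (m & (m-1)) power-of-two test by deriving the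
-- exponent from bit_length in closed form and verifying n+1 == 2**p once (objective: simpler).

-- ===== PORT A =====
-- the `while temp > 1: temp >>= 1; p += 1` loop; `temp >> 1` = floor division by 2 (exact)
def pvFindExp (temp p : Int) : Int :=
  if 1 < temp then pvFindExp (PySem.Int.floordiv temp 2) (p + 1) else p
termination_by temp.toNat
decreasing_by
  rw [PySem.Int.floordiv_eq_ediv_of_pos (by omega)]
  omega

def is_mersenne_exponent_py (n : Int) : Option Int :=
  let n_plus_1 := n + 1
  if n_plus_1 ≤ 0 then none
  else if PySem.Int.band n_plus_1 (n_plus_1 - 1) ≠ 0 then none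
  else some (pvFindExp n_plus_1 0)

-- ===== PORT B =====
def is_mersenne_exponent_py_alt (n : Int) : Option Int :=
  let m := n + 1
  if m ≤ 0 then none
  else
    let p : Nat := PySem.Int.bitLength m - 1  -- m ≥ 1 here, so bit_length ≥ 1: Nat subtraction is exact
    if m = 2 ^ p then some (p : Int) else none

-- ===== PRECONDITION & SPEC =====
def Spec_is_mersenne_exponent_py (n : Int) (out : Option Int) : Prop := out = is_mersenne_exponent_py_alt n
instance (n : Int) (out : Option Int) : Decidable (Spec_is_mersenne_exponent_py n out) := by unfold Spec_is_mersenne_exponent_py; infer_instance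

-- ===== CLAIM (what is proved, stated in full; the proofs are below) =====
def Claim_equal_is_mersenne_exponent_py : Prop := ∀ (n : Int), Dom_is_mersenne_exponent_py n → Spec_is_mersenne_exponent_py n (is_mersenne_exponent_py n)

-- ===== LEMMAS AND PROOFS =====

-- A's loop computes floor(log2): pvFindExp ↑t p = p + log2 t
theorem pvFindExp_eq_log2 (t : Nat) (p : Int) : pvFindExp (t : Int) p = p + Nat.log2 t := by
  induction t using Nat.strong_induction_on generalizing p with
  | _ t ih =>
    rw [pvFindExp]
    by_cases h : 2 ≤ t
    · rw [if_pos (by exact_mod_cast h)]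
      have hdiv : PySem.Int.floordiv (t : Int) 2 = ((t / 2 : Nat) : Int) := by
        exact_mod_cast PySem.Int.floordiv_natCast t 2
      have hlog : Nat.log2 t = Nat.log2 (t / 2) + 1 := by
        rw [Nat.log2_eq_succ_log2_shiftRight (by simpa [Nat.shiftRight_one] using by omega : t >>> 1 ≠ 0)]
        simp [Nat.shiftRight_one]
      rw [hdiv, ih (t / 2) (by omega), hlog]
      push_cast
      ring
    · rw [if_neg (by exact_mod_cast h)]
      interval_cases t <;> simp [Nat.log2]

-- Python bit_length of a positive Nat is log2 + 1
theorem bitLength_eq_log2 (M : Nat) (h : 0 < M) :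
    PySem.Int.bitLength (M : Int) = Nat.log2 M + 1 := by
  induction M using Nat.strong_induction_on with
  | _ M ih =>
    by_cases h2 : 2 ≤ M
    · have hn : M >>> 1 ≠ 0 := by
        simp only [Nat.shiftRight_one]
        omega
      rw [PySem.Int.bitLength_natCast h, ih (M / 2) (by omega) (by omega),
          Nat.log2_eq_succ_log2_shiftRight hn]
      simp [Nat.shiftRight_one]
    · interval_cases M
      decide

-- the (m & (m-1)) == 0 test is equivalent to m being exactly 2^log2(m)
theorem and_pred_iff_pow (M : Nat) (h : M ≠ 0) :
    M &&& (M - 1) = 0 ↔ M = 2 ^ Nat.log2 M := by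
  rw [Nat.and_sub_one_eq_zero_iff_isPowerOfTwo h]
  constructor
  · rintro ⟨k, rfl⟩
    rw [Nat.log2_two_pow]
  · intro hM
    exact ⟨Nat.log2 M, hM⟩

theorem band_pred_natCast (M : Nat) (h : 0 < M) :
    PySem.Int.band (M : Int) ((M : Int) - 1) = ((M &&& (M - 1) : Nat) : Int) := by
  rw [show ((M : Int) - 1) = ((M - 1 : Nat) : Int) by omega]
  simp

-- ===== VERDICT (by name: the statement is the Claim_ definition above) =====
theorem is_mersenne_exponent_py_spec : Claim_equal_is_mersenne_exponent_py := by
  intro n _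
  unfold Spec_is_mersenne_exponent_py is_mersenne_exponent_py is_mersenne_exponent_py_alt
  by_cases hle : n + 1 ≤ 0
  · simp [hle]
  · simp only [if_neg hle]
    obtain ⟨M, hM, hMpos⟩ : ∃ M : Nat, n + 1 = (M : Int) ∧ 0 < M := ⟨(n + 1).toNat, by omega, by omega⟩
    rw [hM, band_pred_natCast M hMpos, bitLength_eq_log2 M hMpos,
        pvFindExp_eq_log2 M 0, Nat.add_sub_cancel]
    by_cases hpow : M &&& (M - 1) = 0
    · have hEq : M = 2 ^ Nat.log2 M := (and_pred_iff_pow M (by omega)).mp hpow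
      rw [if_neg (by simp [hpow]), if_pos (by exact_mod_cast hEq)]
      simp
    · have hpow' : ((M &&& (M - 1) : Nat) : Int) ≠ 0 := by
        simpa using hpow
      have hne : ¬ ((M : Int) = 2 ^ Nat.log2 M) := by
        exact_mod_cast fun hEq => hpow ((and_pred_iff_pow M (by omega)).mpr hEq)
      rw [if_pos hpow', if_neg hne]
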